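-- pv_equiv track=rewrite | github.com/KingaCichecka/prg-basics | 07-Arrays/3.18.py | difference_max_min
-- ===== SOURCE A (Python) =====
-- def difference_max_min(array):
--     # bez wbudowanych funkcji
--     min_val = array[0]
--     max_val = array[0]
--     for x in array[1:]:
--         if x < min_val:
--             min_val = x
--         if x > max_val:
--             max_val = x
--     return max_val - min_val
-- ===== SOURCE B (Python) =====
-- def difference_max_min(array):
--     # sort a fresh copy and read the extremes
--     s = sorted(array)
--     return s[-1] - s[0]
-- ===== Notes on version B (the rewrite author's own statement) =====
-- stated objective: idiomatic
-- what changed: Replaces the single-pass min/max-tracking loop with sorting a fresh copy and subtracting the first sorted element from the last.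
import Mathlib
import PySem

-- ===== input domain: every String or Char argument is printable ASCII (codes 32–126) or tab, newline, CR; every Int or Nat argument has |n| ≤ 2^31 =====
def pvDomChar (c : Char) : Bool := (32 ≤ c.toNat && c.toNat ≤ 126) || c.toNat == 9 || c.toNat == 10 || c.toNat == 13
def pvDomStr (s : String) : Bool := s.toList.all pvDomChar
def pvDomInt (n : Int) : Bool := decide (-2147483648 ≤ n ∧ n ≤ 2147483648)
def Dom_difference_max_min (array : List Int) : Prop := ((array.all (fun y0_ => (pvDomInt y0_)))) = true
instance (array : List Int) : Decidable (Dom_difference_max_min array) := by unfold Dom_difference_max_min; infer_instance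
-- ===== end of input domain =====

-- B sorts a fresh copy and subtracts the first sorted element from the last, instead of A's min/max-tracking scan.

-- ===== PORT A =====
def difference_max_min (array : List Int) : Int :=
  match array with
  | [] => 0  -- array[0] raises IndexError here; excluded by Pre_
  | a :: _ =>
    let mm := (PySem.List.slice array (some 1) none).foldl
      (fun s x => (if x < s.1 then x else s.1, if s.2 < x then x else s.2)) (a, a)
    mm.2 - mm.1

-- ===== PORT B =====
def difference_max_min_alt (array : List Int) : Int :=
  let s := PySem.List.sorted array (fun x => x) false
  -- last and first sorted element via pyGet?; pyGet? is none (IndexError) only on the empty list, excluded by Pre_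
  (PySem.List.pyGet? s (-1)).getD 0 - (PySem.List.pyGet? s 0).getD 0

-- ===== PRECONDITION & SPEC =====
-- A raises IndexError (indexing the first element) on the empty list; so does B (indexing the sorted copy).
def Pre_difference_max_min (array : List Int) : Prop := array ≠ []
instance (array : List Int) : Decidable (Pre_difference_max_min array) := by unfold Pre_difference_max_min; infer_instance
def pvWitness_difference_max_min : List Int := [3, -1, 7]

def Spec_difference_max_min (array : List Int) (out : Int) : Prop := out = difference_max_min_alt array
instance (array : List Int) (out : Int) : Decidable (Spec_difference_max_min array out) := by unfold Spec_difference_max_min; infer_instance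

-- ===== CLAIM (what is proved, stated in full; the proofs are below) =====
def Claim_equal_difference_max_min : Prop := ∀ (array : List Int), Dom_difference_max_min array → Pre_difference_max_min array → Spec_difference_max_min array (difference_max_min array)

-- ===== LEMMAS AND PROOFS =====

-- A's running min/max over the tail are List.foldl min / List.foldl max
theorem a_eval (a : Int) (t : List Int) :
    difference_max_min (a :: t) = t.foldl max a - t.foldl min a := by
  simp only [difference_max_min, PySem.List.slice_from_one, List.tail_cons]
  rw [PySem.List.foldl_prod_mk (f := fun s x => if x < s then x else s)
        (g := fun s x => if s < x then x else s)]
  have hmin : t.foldl (fun s x => if x < s then x else s) a = t.foldl min a := by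
    apply PySem.List.foldl_congr_mem
    intro acc x _
    simp only [min_def]
    split_ifs <;> omega
  have hmax : t.foldl (fun s x => if s < x then x else s) a = t.foldl max a := by
    apply PySem.List.foldl_congr_mem
    intro acc x _
    simp only [max_def]
    split_ifs <;> omega
  simp [hmin, hmax]

-- head of sorted(a::t) is the running minimum
theorem sorted_head (a : Int) (t : List Int) (m : Int) (r : List Int)
    (hs : PySem.List.sorted (a :: t) (fun x => x) false = m :: r) :
    m = t.foldl min a := by
  have hle : ∀ y ∈ a :: t, m ≤ y := PySem.List.key_head_sorted_le _ _ hs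
  have hmem : m ∈ a :: t := by
    have hm : m ∈ PySem.List.sorted (a :: t) (fun x => x) false := by simp [hs]
    exact (PySem.List.mem_sorted _ _ _ _).1 hm
  have h1 := PySem.List.foldl_min_le t a
  have hf : t.foldl min a ∈ a :: t := by
    rcases PySem.List.foldl_min_mem t a with h | h
    · simp [h]
    · simp [h]
  have hfm : t.foldl min a ≤ m := by
    rcases List.mem_cons.1 hmem with h | h
    · exact h ▸ h1.1
    · exact h1.2 m h
  exact le_antisymm (hfm) (hle _ hf) |>.symm

-- getLast of the sorted list is the running maximum
theorem sorted_last (a : Int) (t : List Int) :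
    (PySem.List.sorted (a :: t) (fun x => x) false).getLast? = some (t.foldl max a) := by
  have hne : PySem.List.sorted (a :: t) (fun x => x) false ≠ [] := by
    simp [PySem.List.sorted_eq_nil_iff]
  set s := PySem.List.sorted (a :: t) (fun x => x) false with hsdef
  have hL : s.getLast? = some (s.getLast hne) := List.getLast?_eq_some_getLast hne
  rw [hL]
  congr 1
  have hmemL : s.getLast hne ∈ a :: t := by
    have : s.getLast hne ∈ s := List.getLast_mem hne
    exact (PySem.List.mem_sorted _ _ _ _).1 this
  have hmax := PySem.List.le_foldl_max t a
  have hfm : t.foldl max a ∈ a :: t := by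
    rcases PySem.List.foldl_max_mem t a with h | h
    · simp [h]
    · simp [h]
  have hub : ∀ y ∈ s, y ≤ s.getLast hne := by
    intro y hy
    rcases List.mem_iff_getElem.1 hy with ⟨p, hp, hpy⟩
    have hlen : 0 < s.length := List.length_pos_iff.2 hne
    have hmono := PySem.List.sorted_id_getElem_mono (xs := a :: t)
      (p := p) (q := s.length - 1) (by omega) (by rw [← hsdef]; omega)
    rw [List.getLast_eq_getElem]
    have : s[p] ≤ s[s.length - 1] := by simpa [hsdef] using hmono
    omega
  have hfs : t.foldl max a ∈ s := (PySem.List.mem_sorted _ _ _ _).2 hfm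
  have hLle : s.getLast hne ≤ t.foldl max a := by
    rcases List.mem_cons.1 hmemL with h | h
    · exact h ▸ hmax.1
    · exact hmax.2 _ h
  exact le_antisymm hLle (hub _ hfs)

-- ===== VERDICT (by name: the statement is the Claim_ definition above) =====
theorem difference_max_min_spec : Claim_equal_difference_max_min := by
  intro array _ hpre
  unfold Spec_difference_max_min difference_max_min_alt
  match array with
  | [] => exact absurd rfl hpre
  | a :: t =>
    obtain ⟨m, r, hs⟩ : ∃ m r, PySem.List.sorted (a :: t) (fun x => x) false = m :: r := by
      rcases h : PySem.List.sorted (a :: t) (fun x => x) false with _ | ⟨m, r⟩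
      · exact absurd ((PySem.List.sorted_eq_nil_iff _ _ _).1 h) (by simp)
      · exact ⟨m, r, rfl⟩
    rw [a_eval]
    have hlast := sorted_last a t
    have hhead := sorted_head a t m r hs
    show _ = (PySem.List.pyGet? (PySem.List.sorted (a :: t) (fun x => x) false) (-1)).getD 0
        - (PySem.List.pyGet? (PySem.List.sorted (a :: t) (fun x => x) false) 0).getD 0
    rw [PySem.List.pyGet?_neg_one, hlast, hs, PySem.List.pyGet?_zero_cons]
    simp [hhead]
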